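-- pv_equiv track=rewrite | github.com/pes-magic/procon | AtCoder/ARC057/C.py | solve
-- ===== SOURCE A (Python) =====
-- def solve(N):
--     a2 = N**2
--     b2 = (N+1)**2
--     zero_a = True
--     zero_b = True
--     av = []
--     bv = []
--     az = []
--     bz = []
--     while a2 > 0 or b2 > 0:
--         av.append(a2%100)
--         bv.append(b2%100)
--         az.append(zero_a)
--         bz.append(zero_b)
--         a2 //= 100
--         b2 //= 100
--         zero_a &= (av[-1] == 0)
--         zero_b &= (bv[-1] == 0)
--     av.reverse()
--     bv.reverse()
--     az.reverse()
--     bz.reverse()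
--     dif = 0
--     res = 0
--     for i in range(len(av)):
--         dif = min(1000, 100*dif + bv[i] - av[i])
--         res = 100 * res + av[i]
--         if az[i]:
--             return res
--         if (dif == 1 and not bz[i]) or dif >= 2:
--             return res+1
--     return res
-- ===== SOURCE B (Python) =====
-- def solve(N):
--     a2 = N * N
--     b2 = (N + 1) * (N + 1)
--     # number of base-100 digit groups of b2
--     L = 0
--     t = b2
--     while t > 0:
--         L += 1
--         t //= 100
--     # shortest round number in [a2, b2): largest k with ceil(a2/100**k)*100**k < b2
--     for k in range(L - 1, 0, -1):
--         m = -(-a2 // 100 ** k)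
--         if m * 100 ** k < b2:
--             return m
--     return a2
-- ===== Notes on version B (the rewrite author's own statement) =====
-- stated objective: alternative
-- what changed: A builds explicit base-100 digit lists of N^2 and (N+1)^2 plus zero-flag lists and scans them with a running capped prefix difference; B works directly on the numbers, searching downward for the largest power 100^k whose ceiling multiple of N^2 lies below (N+1)^2 and returning that ceiling quotient.
-- intended difference: For negative N divisible by 10 (where (N+1)^2 < N^2, outside the problem's intended positive domain), A returns N^2 with its trailing base-100 zero groups stripped (e.g. 1 for N=-10), an accident of its zero-flag digit loop; B returns N^2 itself, the only sensible square value there. — e.g. on solve(-10): A returns 1, B returns 100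
import Mathlib
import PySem

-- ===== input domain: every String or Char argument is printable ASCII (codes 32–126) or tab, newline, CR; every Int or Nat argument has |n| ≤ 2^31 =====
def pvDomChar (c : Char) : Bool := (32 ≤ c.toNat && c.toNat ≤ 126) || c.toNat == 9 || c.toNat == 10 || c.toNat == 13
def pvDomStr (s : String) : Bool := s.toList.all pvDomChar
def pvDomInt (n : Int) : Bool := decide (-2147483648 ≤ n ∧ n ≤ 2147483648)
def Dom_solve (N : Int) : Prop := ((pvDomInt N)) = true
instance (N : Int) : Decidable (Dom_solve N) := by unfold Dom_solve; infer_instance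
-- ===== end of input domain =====

-- B replaces A's digit-list + running-difference pass by a downward search for the largest k
-- with ceil(N^2/100^k)*100^k < (N+1)^2 (objective: alternative; return value only).

-- ===== PORT A =====

-- termination helpers for the while-loops
theorem pvToNat_floordiv_le (x : Int) : (PySem.Int.floordiv x 100).toNat ≤ x.toNat := by
  rw [PySem.Int.floordiv_eq_ediv_of_pos (by omega)]; omega

theorem pvToNat_floordiv_lt (x : Int) (hx : 0 < x) :
    (PySem.Int.floordiv x 100).toNat < x.toNat := by
  rw [PySem.Int.floordiv_eq_ediv_of_pos (by omega)]; omega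

-- the `while a2 > 0 or b2 > 0` loop: builds the base-100 digit lists (LSB first) and the zero flags
def loopA (a2 b2 : Int) (za zb : Bool) (av bv : List Int) (az bz : List Bool) :
    List Int × List Int × List Bool × List Bool :=
  if h : 0 < a2 ∨ 0 < b2 then
    loopA (PySem.Int.floordiv a2 100) (PySem.Int.floordiv b2 100)
      (za && (PySem.Int.mod a2 100 == 0)) (zb && (PySem.Int.mod b2 100 == 0))
      (av ++ [PySem.Int.mod a2 100]) (bv ++ [PySem.Int.mod b2 100])
      (az ++ [za]) (bz ++ [zb])
  else (av, bv, az, bz)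
termination_by a2.toNat + b2.toNat
decreasing_by
  rcases h with h | h
  · exact Nat.add_lt_add_of_lt_of_le (pvToNat_floordiv_lt _ h) (pvToNat_floordiv_le _)
  · exact Nat.add_lt_add_of_le_of_lt (pvToNat_floordiv_le _) (pvToNat_floordiv_lt _ h)

-- the `for i in range(len(av))` loop with its early returns
def loopA2 : List Int → List Int → List Bool → List Bool → Int → Int → Int
  | a :: av, b :: bv, fa :: az, fb :: bz, dif, res =>
    let dif' := min 1000 (100 * dif + b - a)
    let res' := 100 * res + a
    if fa then res'
    else if (dif' == 1 && !fb) || 2 ≤ dif' then res' + 1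
    else loopA2 av bv az bz dif' res'
  | _, _, _, _, _, res => res

def solve (N : Int) : Int :=
  match loopA (N ^ 2) ((N + 1) ^ 2) true true [] [] [] [] with
  | (av, bv, az, bz) => loopA2 av.reverse bv.reverse az.reverse bz.reverse 0 0

-- ===== PORT B =====

-- `while t > 0: L += 1; t //= 100`
def dlenB (t : Int) : Nat :=
  if h : 0 < t then dlenB (PySem.Int.floordiv t 100) + 1 else 0
termination_by t.toNat
decreasing_by exact pvToNat_floordiv_lt _ h

-- `for k in range(L - 1, 0, -1)` with its early return, then the final `return a2`
def searchB (a2 b2 : Int) : Nat → Int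
  | 0 => a2
  | k + 1 =>
    let m := -(PySem.Int.floordiv (-a2) (100 ^ (k + 1)))
    if m * 100 ^ (k + 1) < b2 then m else searchB a2 b2 k

def solve_alt (N : Int) : Int :=
  let a2 := N * N
  let b2 := (N + 1) * (N + 1)
  searchB a2 b2 (dlenB b2 - 1)

-- ===== PRECONDITION & SPEC =====
-- For negative N divisible by 10 (where (N+1)^2 < N^2, outside the problem's intended positive
-- domain), A returns N^2 with its trailing base-100 zero groups stripped (e.g. 1 for N = -10),
-- an accident of its zero-flag digit loop; B returns N^2 itself, the only sensible square value there.
def D_solve (N : Int) : Prop := N < 0 ∧ (10 : Int) ∣ N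
instance (N : Int) : Decidable (D_solve N) := by unfold D_solve; infer_instance

def Spec_solve (N : Int) (out : Int) : Prop := ¬ D_solve N → out = solve_alt N
instance (N : Int) (out : Int) : Decidable (Spec_solve N out) := by unfold Spec_solve; infer_instance

def pvDiffWitness_solve : Int := -10
def pvDiffWitnessOut_solve : Int × Int := (1, 100)

-- ===== CLAIM (what is proved, stated in full; the proofs are below) =====
def Claim_unchanged_solve : Prop := ∀ (N : Int), Dom_solve N → Spec_solve N (solve N)
def Claim_changed_solve : Prop := Dom_solve (pvDiffWitness_solve) ∧ D_solve (pvDiffWitness_solve) ∧ solve (pvDiffWitness_solve) = pvDiffWitnessOut_solve.1 ∧ solve_alt (pvDiffWitness_solve) = pvDiffWitnessOut_solve.2 ∧ pvDiffWitnessOut_solve.1 ≠ pvDiffWitnessOut_solve.2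
def Claim_exact_solve : Prop := ∀ (N : Int), Dom_solve N → D_solve N → solve N ≠ solve_alt N

-- ===== LEMMAS AND PROOFS =====

theorem ediv_shift (a : Int) (n : Nat) :
    a / 100 ^ n = 100 * (a / 100 ^ (n + 1)) + (a / 100 ^ n) % 100 := by
  have h1 : a / 100 ^ n / 100 = a / 100 ^ (n + 1) := by
    rw [Int.ediv_ediv_of_nonneg (by positivity), ← pow_succ]
  rw [← h1]
  exact (Int.mul_ediv_add_emod (a / 100 ^ n) 100).symm

theorem dvd_split (a : Int) (n : Nat) :
    (100 : Int) ^ (n + 1) ∣ a ↔ (100 : Int) ∣ a ∧ (100 : Int) ^ n ∣ a / 100 := by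
  constructor
  · rintro ⟨c, rfl⟩
    refine ⟨⟨100 ^ n * c, by ring⟩, ?_⟩
    have : (100 : Int) ^ (n + 1) * c = 100 * (100 ^ n * c) := by ring
    rw [this, Int.mul_ediv_cancel_left _ (by norm_num)]
    exact ⟨c, rfl⟩
  · rintro ⟨⟨d, rfl⟩, h2⟩
    rw [Int.mul_ediv_cancel_left _ (by norm_num)] at h2
    obtain ⟨e, rfl⟩ := h2
    exact ⟨e, by ring⟩

theorem emod_split (a : Int) (n : Nat) :
    a % 100 ^ (n + 1) = 0 ↔ (a % 100 = 0 ∧ (a / 100) % 100 ^ n = 0) := by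
  simp only [EuclideanDomain.mod_eq_zero]
  exact dvd_split a n

theorem ceil_eq (a P : Int) (_ha : 0 ≤ a) (hP : 0 < P) :
    -(PySem.Int.floordiv (-a) P) = a / P + (if P ∣ a then 0 else 1) := by
  rw [PySem.Int.neg_floordiv_neg_eq_iff_of_pos hP]
  have hm := Int.mul_ediv_add_emod a P
  have hr0 : 0 ≤ a % P := Int.emod_nonneg a (by omega)
  have hrP : a % P < P := Int.emod_lt_of_pos a hP
  have hm' : a / P * P + a % P = a := by rw [mul_comm] at hm; exact hm
  split_ifs with hdvd
  · have h0 : a % P = 0 := EuclideanDomain.mod_eq_zero.mpr hdvd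
    constructor
    · rw [add_zero]; linarith
    · rw [add_zero]
      have e : (a / P - 1) * P = a / P * P - P := by ring
      linarith
  · have h0 : a % P ≠ 0 := fun h => hdvd (EuclideanDomain.mod_eq_zero.mp h)
    constructor
    · have : (a / P + 1 - 1) * P = a / P * P := by ring
      rw [this]; omega
    · have : (a / P + 1) * P = a / P * P + P := by ring
      rw [this]; omega

-- MSB-first list of the low n base-100 digits of a
def msbD (n : Nat) (a : Int) : List Int :=
  match n with
  | 0 => []
  | n + 1 => (a / 100 ^ n) % 100 :: msbD n a

-- MSB-first list of the zero flags: position j (from the bottom) carries z && (a % 100^j == 0)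
def msbFz (n : Nat) (a : Int) (z : Bool) : List Bool :=
  match n with
  | 0 => []
  | n + 1 => (z && decide (a % 100 ^ n = 0)) :: msbFz n a z

-- number of iterations of A's while loop
def dlen2 (a b : Int) : Nat :=
  if h : 0 < a ∨ 0 < b then dlen2 (a / 100) (b / 100) + 1 else 0
termination_by a.toNat + b.toNat
decreasing_by rcases h with h | h <;> omega

theorem msbD_shift (n : Nat) (a : Int) :
    msbD (n + 1) a = msbD n (a / 100) ++ [a % 100] := by
  induction n with
  | zero => simp [msbD]
  | succ n ih =>
    show (a / 100 ^ (n + 1)) % 100 :: msbD (n + 1) a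
        = ((a / 100) / 100 ^ n) % 100 :: msbD n (a / 100) ++ [a % 100]
    rw [ih, Int.ediv_ediv_of_nonneg (by norm_num), ← pow_succ']
    simp

theorem msbFz_shift (n : Nat) (a : Int) (z : Bool) :
    msbFz (n + 1) a z = msbFz n (a / 100) (z && (a % 100 == 0)) ++ [z] := by
  induction n with
  | zero => simp [msbFz]
  | succ n ih =>
    show (z && decide (a % 100 ^ (n + 1) = 0)) :: msbFz (n + 1) a z
        = ((z && (a % 100 == 0)) && decide ((a / 100) % 100 ^ n = 0)) ::
            msbFz n (a / 100) (z && (a % 100 == 0)) ++ [z]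
    rw [ih]
    have h := emod_split a n
    have this1 : decide (a % 100 ^ (n + 1) = 0)
        = (decide (a % 100 = 0) && decide ((a / 100) % 100 ^ n = 0)) := by
      rw [← Bool.decide_and, decide_eq_decide]
      exact h
    have hbeq : (a % 100 == 0) = decide (a % 100 = 0) := rfl
    rw [this1, hbeq, Bool.and_assoc, List.cons_append]

theorem dlen2_bound (a b : Int) (ha : 0 ≤ a) (hb : 0 ≤ b) :
    a < 100 ^ dlen2 a b ∧ b < 100 ^ dlen2 a b := by
  induction a, b using dlen2.induct with
  | case1 a b h ih =>
    rw [dlen2, dif_pos h]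
    obtain ⟨h1, h2⟩ := ih (by omega) (by omega)
    rw [pow_succ]
    generalize (100 : Int) ^ dlen2 (a / 100) (b / 100) = P at h1 h2
    omega
  | case2 a b h =>
    rw [dlen2, dif_neg h]
    norm_num; omega

theorem dlen2_eq_dlenB (a b : Int) (ha : 0 ≤ a) (hab : a ≤ b) : dlen2 a b = dlenB b := by
  induction a, b using dlen2.induct with
  | case1 a b h ih =>
    have hb : 0 < b := by omega
    rw [dlen2, dif_pos h, dlenB, dif_pos hb,
      PySem.Int.floordiv_eq_ediv_of_pos (by omega : (0:Int) < 100)]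
    rw [ih (Int.ediv_nonneg ha (by omega)) (Int.ediv_le_ediv (by omega) hab)]
  | case2 a b h =>
    rw [dlen2, dif_neg h, dlenB, dif_neg (by omega)]

theorem loopA_eq (a b : Int) (za zb : Bool) (av bv : List Int) (az bz : List Bool)
    (ha : 0 ≤ a) (hb : 0 ≤ b) :
    loopA a b za zb av bv az bz =
      (av ++ (msbD (dlen2 a b) a).reverse, bv ++ (msbD (dlen2 a b) b).reverse,
       az ++ (msbFz (dlen2 a b) a za).reverse, bz ++ (msbFz (dlen2 a b) b zb).reverse) := by
  induction a, b, za, zb, av, bv, az, bz using loopA.induct with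
  | case1 a b za zb av bv az bz h ih =>
    rw [loopA, dif_pos h, dlen2, dif_pos h]
    simp only [PySem.Int.floordiv_eq_ediv_of_pos (show (0:Int) < 100 by omega),
        PySem.Int.mod_eq_emod_of_pos (show (0:Int) < 100 by omega)] at ih ⊢
    rw [ih (Int.ediv_nonneg ha (by omega)) (Int.ediv_nonneg hb (by omega))]
    rw [msbD_shift, msbD_shift, msbFz_shift, msbFz_shift]
    simp [List.append_assoc]
  | case2 a b za zb av bv az bz h =>
    rw [loopA, dif_neg h, dlen2, dif_neg h]
    simp [msbD, msbFz]

theorem loopA2_cons (x y : Int) (f g : Bool) (xs ys : List Int) (fs gs : List Bool)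
    (dif res : Int) :
    loopA2 (x :: xs) (y :: ys) (f :: fs) (g :: gs) dif res =
      (if f then 100 * res + x
       else if (min 1000 (100 * dif + y - x) == 1 && !g) || 2 ≤ min 1000 (100 * dif + y - x)
         then 100 * res + x + 1
       else loopA2 xs ys fs gs (min 1000 (100 * dif + y - x)) (100 * res + x)) := rfl

theorem loopA2_searchB (a b : Int) (ha : 0 ≤ a) (hab : a < b) :
    ∀ n, b / 100 ^ (n + 1) - a / 100 ^ (n + 1) ≤ 1 →
    loopA2 (msbD (n + 1) a) (msbD (n + 1) b) (msbFz (n + 1) a true) (msbFz (n + 1) b true)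
      (b / 100 ^ (n + 1) - a / 100 ^ (n + 1)) (a / 100 ^ (n + 1)) = searchB a b n := by
  intro n
  induction n with
  | zero =>
    intro _
    have ea := ediv_shift a 0
    simp only [msbD, msbFz, loopA2, searchB, pow_zero, Int.emod_one, decide_true,
      Bool.and_true, if_true, Int.ediv_one] at *
    omega
  | succ n ih =>
    intro hdif
    have hP : (0:Int) < 100 ^ (n + 1) := by positivity
    have ea := ediv_shift a (n + 1)
    have eb := ediv_shift b (n + 1)
    have hra := Int.emod_nonneg (a / 100 ^ (n + 1)) (show (100:Int) ≠ 0 by omega)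
    have hra' := Int.emod_lt_of_pos (a / 100 ^ (n + 1)) (show (0:Int) < 100 by omega)
    have hrb := Int.emod_nonneg (b / 100 ^ (n + 1)) (show (100:Int) ≠ 0 by omega)
    have hrb' := Int.emod_lt_of_pos (b / 100 ^ (n + 1)) (show (0:Int) < 100 by omega)
    have hbd : 100 ^ (n+1) * (b / 100 ^ (n+1)) + b % 100 ^ (n+1) = b :=
      Int.mul_ediv_add_emod b _
    have had : 100 ^ (n+1) * (a / 100 ^ (n+1)) + a % 100 ^ (n+1) = a :=
      Int.mul_ediv_add_emod a _
    have hrb0 := Int.emod_nonneg b (show (100:Int)^(n+1) ≠ 0 by omega)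
    have hrb1 := Int.emod_lt_of_pos b hP
    have hra0 := Int.emod_nonneg a (show (100:Int)^(n+1) ≠ 0 by omega)
    have hra1 := Int.emod_lt_of_pos a hP
    rw [show msbD (n + 1 + 1) a = (a / 100 ^ (n+1)) % 100 :: msbD (n + 1) a from rfl,
        show msbD (n + 1 + 1) b = (b / 100 ^ (n+1)) % 100 :: msbD (n + 1) b from rfl,
        show msbFz (n + 1 + 1) a true
          = (true && decide (a % 100 ^ (n+1) = 0)) :: msbFz (n + 1) a true from rfl,
        show msbFz (n + 1 + 1) b true
          = (true && decide (b % 100 ^ (n+1) = 0)) :: msbFz (n + 1) b true from rfl,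
        loopA2_cons]
    have harg : 100 * (b / 100 ^ (n + 1 + 1) - a / 100 ^ (n + 1 + 1))
        + b / 100 ^ (n + 1) % 100 - a / 100 ^ (n + 1) % 100
        = 100 * (b / 100 ^ (n + 1 + 1)) - 100 * (a / 100 ^ (n + 1 + 1))
        + b / 100 ^ (n + 1) % 100 - a / 100 ^ (n + 1) % 100 := by ring
    have hdif' : min 1000 (100 * (b / 100 ^ (n + 1 + 1)) - 100 * (a / 100 ^ (n + 1 + 1))
        + b / 100 ^ (n + 1) % 100 - a / 100 ^ (n + 1) % 100)
        = b / 100 ^ (n + 1) - a / 100 ^ (n + 1) := by omega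
    have hres : 100 * (a / 100 ^ (n + 1 + 1)) + a / 100 ^ (n + 1) % 100
        = a / 100 ^ (n + 1) := by omega
    rw [harg, hdif', hres]
    simp only [searchB]
    rw [ceil_eq a _ ha hP]
    by_cases haz : a % 100 ^ (n + 1) = 0
    · have hdvd : (100:Int) ^ (n+1) ∣ a := EuclideanDomain.mod_eq_zero.mp haz
      have hma : a / 100 ^ (n+1) * 100 ^ (n+1) = a := Int.ediv_mul_cancel hdvd
      simp only [haz, decide_true, Bool.true_and, hdvd, if_pos, add_zero]
      rw [if_pos (show a / 100 ^ (n+1) * 100 ^ (n+1) < b by omega)]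
    · have hdvd : ¬ (100:Int) ^ (n+1) ∣ a := fun h => haz (EuclideanDomain.mod_eq_zero.mpr h)
      simp only [haz, decide_false, Bool.true_and, Bool.false_eq_true, if_false, if_neg hdvd]
      set qa := a / 100 ^ (n + 1) with hqa
      set qb := b / 100 ^ (n + 1) with hqb
      by_cases hlt : (qa + 1) * 100 ^ (n + 1) < b
      · rw [if_pos hlt]
        have hq1 : qa + 1 ≤ qb := by
          have hmul : (qa + 1) * 100 ^ (n + 1) < (qb + 1) * 100 ^ (n + 1) := by
            have e : (qb + 1) * 100 ^ (n + 1) = 100 ^ (n + 1) * qb + 100 ^ (n + 1) := by ring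
            linarith
          have := lt_of_mul_lt_mul_right hmul (le_of_lt hP)
          omega
        have hcond : (((qb - qa == 1) && !decide (b % 100 ^ (n + 1) = 0))
            || decide (2 ≤ qb - qa)) = true := by
          by_cases h2 : 2 ≤ qb - qa
          · simp [h2]
          · have hq : qb = qa + 1 := by omega
            have hrbne : b % 100 ^ (n + 1) ≠ 0 := by
              intro h0
              rw [h0, add_zero, hq] at hbd
              have e : (qa + 1) * 100 ^ (n + 1) = 100 ^ (n + 1) * (qa + 1) := by ring
              linarith
            simp [hq, hrbne]
        simp only [hcond, if_true]
      · rw [if_neg hlt]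
        rw [not_lt] at hlt
        have hq1 : qb ≤ qa + 1 := by
          have hmul : qb * 100 ^ (n + 1) ≤ (qa + 1) * 100 ^ (n + 1) := by
            have e : qb * 100 ^ (n + 1) = 100 ^ (n + 1) * qb := by ring
            linarith
          exact le_of_mul_le_mul_right hmul hP
        have hcond : (((qb - qa == 1) && !decide (b % 100 ^ (n + 1) = 0))
            || decide (2 ≤ qb - qa)) = false := by
          by_cases hq : qb - qa = 1
          · have hrbz : b % 100 ^ (n + 1) = 0 := by
              have hqe : qb = qa + 1 := by omega
              rw [hqe] at hbd
              nlinarith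
            simp [hq, hrbz]
          · have h2 : ¬ (2 ≤ qb - qa) := by omega
            simp [hq, h2]
        simp only [hcond, Bool.false_eq_true, if_false]
        exact ih (by omega)

theorem main_eq (N : Int) (hN : 0 ≤ N) : solve N = solve_alt N := by
  have hNN : N * N = N ^ 2 := by ring
  have hNN1 : (N + 1) * (N + 1) = (N + 1) ^ 2 := by ring
  have ha : (0:Int) ≤ N ^ 2 := sq_nonneg N
  have hb : (0:Int) ≤ (N + 1) ^ 2 := sq_nonneg _
  have hcase : N ^ 2 < (N + 1) ^ 2 := by
    have e : (N + 1) ^ 2 = N ^ 2 + 2 * N + 1 := by ring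
    linarith
  rw [solve, loopA_eq _ _ _ _ _ _ _ _ ha hb, solve_alt]
  simp only [List.nil_append, List.reverse_reverse, hNN, hNN1]
  have hbpos : (0:Int) < (N + 1) ^ 2 := by omega
  obtain ⟨n, hn⟩ : ∃ n, dlen2 (N ^ 2) ((N + 1) ^ 2) = n + 1 := by
    rw [dlen2, dif_pos (Or.inr hbpos)]; exact ⟨_, rfl⟩
  have hLB : dlen2 (N ^ 2) ((N + 1) ^ 2) = dlenB ((N + 1) ^ 2) :=
    dlen2_eq_dlenB _ _ ha (le_of_lt hcase)
  have hbound := dlen2_bound (N ^ 2) ((N + 1) ^ 2) ha hb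
  rw [hn] at hbound
  have h0a : N ^ 2 / 100 ^ (n + 1) = 0 := Int.ediv_eq_zero_of_lt ha hbound.1
  have h0b : (N + 1) ^ 2 / 100 ^ (n + 1) = 0 := Int.ediv_eq_zero_of_lt hb hbound.2
  have h := loopA2_searchB (N ^ 2) ((N + 1) ^ 2) ha hcase n (by rw [h0a, h0b]; omega)
  rw [h0a, h0b] at h
  have hidx : dlenB ((N + 1) ^ 2) - 1 = n := by omega
  rw [hn, hidx]
  simpa using h

-- `stripB` describes what A's zero-flag early return computes for (N+1)^2 < N^2:
-- N^2 with its trailing base-100 zero groups stripped (proof-side helper only)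
def stripB (a : Int) : Int :=
  if h : a ≠ 0 ∧ PySem.Int.mod a 100 = 0 then stripB (PySem.Int.floordiv a 100) else a
termination_by a.natAbs
decreasing_by
  obtain ⟨h0, hm⟩ := h
  have hdvd : (100 : Int) ∣ a := (PySem.Int.mod_eq_zero_iff_dvd a 100).mp hm
  rw [PySem.Int.floordiv_eq_ediv_of_pos (by omega)]
  obtain ⟨c, rfl⟩ := hdvd
  rw [Int.mul_ediv_cancel_left _ (by omega)]
  have : c ≠ 0 := by rintro rfl; simp at h0
  have h100 : ((100 : Int)).natAbs = 100 := rfl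
  rw [Int.natAbs_mul, h100]
  omega

theorem stripB_eq (k : Nat) : ∀ (a : Int), a ≠ 0 → (100 : Int) ^ k ∣ a →
    ¬ (100 : Int) ^ (k + 1) ∣ a → stripB a = a / 100 ^ k := by
  induction k with
  | zero =>
    intro a h0 _ hnd
    rw [stripB, dif_neg, pow_zero, Int.ediv_one]
    rintro ⟨-, hm⟩
    exact hnd (by rw [pow_one]; exact (PySem.Int.mod_eq_zero_iff_dvd a 100).mp hm)
  | succ k ih =>
    intro a h0 hd hnd
    have h100 : (100 : Int) ∣ a := dvd_trans (dvd_pow_self 100 (Nat.succ_ne_zero k)) hd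
    rw [stripB, dif_pos ⟨h0, (PySem.Int.mod_eq_zero_iff_dvd a 100).mpr h100⟩,
      PySem.Int.floordiv_eq_ediv_of_pos (by omega : (0:Int) < 100)]
    have hq : ∀ m : Nat, ((100:Int) ^ m ∣ a / 100) ↔ (100:Int) ^ (m+1) ∣ a := by
      intro m
      rw [dvd_split]
      exact ⟨fun hh => ⟨h100, hh⟩, fun hh => hh.2⟩
    have h1 : a / 100 ≠ 0 := by
      intro hz
      obtain ⟨c, rfl⟩ := h100
      rw [Int.mul_ediv_cancel_left _ (by omega)] at hz
      exact h0 (by rw [hz, mul_zero])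
    rw [ih (a / 100) h1 ((hq k).mpr hd) (fun hh => hnd ((hq (k+1)).mp hh))]
    rw [Int.ediv_ediv_of_nonneg (by norm_num), ← pow_succ']

theorem loopA2_stripB (a b : Int) (hb : 0 ≤ b) (hba : b < a) :
    ∀ n, ¬ (100:Int) ^ (n + 1) ∣ a →
    loopA2 (msbD (n + 1) a) (msbD (n + 1) b) (msbFz (n + 1) a true) (msbFz (n + 1) b true)
      (b / 100 ^ (n + 1) - a / 100 ^ (n + 1)) (a / 100 ^ (n + 1)) = stripB a := by
  have ha : 0 < a := by omega
  intro n
  induction n with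
  | zero =>
    intro hnd
    simp only [msbD, msbFz, loopA2, pow_zero, Int.emod_one, decide_true,
      Bool.and_true, if_true, Int.ediv_one]
    rw [stripB_eq 0 a (by omega) (by rw [pow_zero]; exact one_dvd a) (by rwa [zero_add])]
    simp only [pow_zero, Int.ediv_one]
    have := ediv_shift a 0
    simp only [pow_zero, Int.ediv_one] at this
    omega
  | succ n ih =>
    intro hnd
    have hP : (0:Int) < 100 ^ (n + 1) := by positivity
    have hP2 : (0:Int) < 100 ^ (n + 1 + 1) := by positivity
    have hmono : b / 100 ^ (n + 1) ≤ a / 100 ^ (n + 1) := Int.ediv_le_ediv hP (le_of_lt hba)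
    have hmono2 : b / 100 ^ (n + 1 + 1) ≤ a / 100 ^ (n + 1 + 1) :=
      Int.ediv_le_ediv hP2 (le_of_lt hba)
    have ea := ediv_shift a (n + 1)
    have eb := ediv_shift b (n + 1)
    have hra := Int.emod_nonneg (a / 100 ^ (n + 1)) (show (100:Int) ≠ 0 by omega)
    have hra' := Int.emod_lt_of_pos (a / 100 ^ (n + 1)) (show (0:Int) < 100 by omega)
    have hrb := Int.emod_nonneg (b / 100 ^ (n + 1)) (show (100:Int) ≠ 0 by omega)
    have hrb' := Int.emod_lt_of_pos (b / 100 ^ (n + 1)) (show (0:Int) < 100 by omega)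
    rw [show msbD (n + 1 + 1) a = (a / 100 ^ (n+1)) % 100 :: msbD (n + 1) a from rfl,
        show msbD (n + 1 + 1) b = (b / 100 ^ (n+1)) % 100 :: msbD (n + 1) b from rfl,
        show msbFz (n + 1 + 1) a true
          = (true && decide (a % 100 ^ (n+1) = 0)) :: msbFz (n + 1) a true from rfl,
        show msbFz (n + 1 + 1) b true
          = (true && decide (b % 100 ^ (n+1) = 0)) :: msbFz (n + 1) b true from rfl,
        loopA2_cons]
    have harg : 100 * (b / 100 ^ (n + 1 + 1) - a / 100 ^ (n + 1 + 1))
        + b / 100 ^ (n + 1) % 100 - a / 100 ^ (n + 1) % 100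
        = 100 * (b / 100 ^ (n + 1 + 1)) - 100 * (a / 100 ^ (n + 1 + 1))
        + b / 100 ^ (n + 1) % 100 - a / 100 ^ (n + 1) % 100 := by ring
    have hdif' : min 1000 (100 * (b / 100 ^ (n + 1 + 1)) - 100 * (a / 100 ^ (n + 1 + 1))
        + b / 100 ^ (n + 1) % 100 - a / 100 ^ (n + 1) % 100)
        = b / 100 ^ (n + 1) - a / 100 ^ (n + 1) := by omega
    have hres : 100 * (a / 100 ^ (n + 1 + 1)) + a / 100 ^ (n + 1) % 100
        = a / 100 ^ (n + 1) := by omega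
    rw [harg, hdif', hres]
    by_cases haz : a % 100 ^ (n + 1) = 0
    · have hdvd : (100:Int) ^ (n+1) ∣ a := EuclideanDomain.mod_eq_zero.mp haz
      simp only [haz, decide_true, Bool.true_and, if_true]
      rw [stripB_eq (n + 1) a (by omega) hdvd hnd]
    · have hdvd : ¬ (100:Int) ^ (n+1) ∣ a := fun h => haz (EuclideanDomain.mod_eq_zero.mpr h)
      have hcond : (((b / 100 ^ (n+1) - a / 100 ^ (n+1) == 1)
            && !decide (b % 100 ^ (n + 1) = 0))
          || decide (2 ≤ b / 100 ^ (n+1) - a / 100 ^ (n+1))) = false := by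
        have h1 : b / 100 ^ (n+1) - a / 100 ^ (n+1) ≠ 1 := by omega
        have h2 : ¬ (2 ≤ b / 100 ^ (n+1) - a / 100 ^ (n+1)) := by omega
        simp [h1, h2]
      simp only [haz, decide_false, Bool.true_and, Bool.false_eq_true, if_false, hcond]
      exact ih hdvd

-- A on negative N: the zero-flag early return yields N^2 with trailing base-100 zero groups stripped
theorem solve_neg (N : Int) (hN : N < 0) : solve N = stripB (N ^ 2) := by
  have ha : (0:Int) ≤ N ^ 2 := sq_nonneg N
  have hb : (0:Int) ≤ (N + 1) ^ 2 := sq_nonneg _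
  have hblt : (N + 1) ^ 2 < N ^ 2 := by
    have e : (N + 1) ^ 2 = N ^ 2 + 2 * N + 1 := by ring
    linarith
  have hNe : N ≠ 0 := by omega
  have hapos : (0:Int) < N ^ 2 := by positivity
  rw [solve, loopA_eq _ _ _ _ _ _ _ _ ha hb]
  simp only [List.nil_append, List.reverse_reverse]
  obtain ⟨n, hn⟩ : ∃ n, dlen2 (N ^ 2) ((N + 1) ^ 2) = n + 1 := by
    rw [dlen2, dif_pos (Or.inl hapos)]; exact ⟨_, rfl⟩
  have hbound := dlen2_bound (N ^ 2) ((N + 1) ^ 2) ha hb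
  rw [hn] at hbound ⊢
  have hnd : ¬ (100:Int) ^ (n + 1) ∣ N ^ 2 := by
    intro hd
    have := Int.le_of_dvd hapos hd
    omega
  have h0a : N ^ 2 / 100 ^ (n + 1) = 0 := Int.ediv_eq_zero_of_lt ha hbound.1
  have h0b : (N + 1) ^ 2 / 100 ^ (n + 1) = 0 := Int.ediv_eq_zero_of_lt hb hbound.2
  have h := loopA2_stripB (N ^ 2) ((N + 1) ^ 2) hb hblt n hnd
  rw [h0a, h0b] at h
  simpa using h

-- B on negative N: no ceiling multiple of N^2 lies below (N+1)^2, so searchB returns N^2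
theorem searchB_of_le (a b : Int) (ha : 0 ≤ a) (hba : b ≤ a) : ∀ n, searchB a b n = a := by
  intro n
  induction n with
  | zero => rfl
  | succ n ih =>
    have hP : (0:Int) < 100 ^ (n + 1) := by positivity
    simp only [searchB]
    rw [ceil_eq a _ ha hP]
    by_cases hd : (100:Int) ^ (n + 1) ∣ a
    · rw [if_pos hd, add_zero, Int.ediv_mul_cancel hd, if_neg (not_lt.mpr hba)]
      exact ih
    · rw [if_neg hd]
      have had := Int.mul_ediv_add_emod a (100 ^ (n + 1))
      have hrP := Int.emod_lt_of_pos a hP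
      have hkey : ¬ ((a / 100 ^ (n + 1) + 1) * 100 ^ (n + 1) < b) := by
        rw [not_lt]
        have hexp : (a / 100 ^ (n + 1) + 1) * 100 ^ (n + 1)
            = 100 ^ (n + 1) * (a / 100 ^ (n + 1)) + 100 ^ (n + 1) := by ring
        rw [hexp]
        omega
      rw [if_neg hkey]
      exact ih

theorem solve_alt_neg (N : Int) (hN : N < 0) : solve_alt N = N * N := by
  have hba : (N + 1) * (N + 1) ≤ N * N := by
    have e : (N + 1) * (N + 1) = N * N + 2 * N + 1 := by ring
    linarith
  have ha : (0:Int) ≤ N * N := mul_self_nonneg N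
  exact searchB_of_le (N * N) ((N + 1) * (N + 1)) ha hba _

theorem hundred_dvd_sq (N : Int) (h : (100 : Int) ∣ N * N) : (10 : Int) ∣ N := by
  have h2 : (2:Int) ∣ N := by
    have h2' : (2:Int) ∣ N * N := dvd_trans (by norm_num) h
    rcases (Int.prime_two.dvd_mul).mp h2' with hh | hh <;> exact hh
  have h5 : (5:Int) ∣ N := by
    have hp5 : Prime (5:Int) := by norm_num
    have h5' : (5:Int) ∣ N * N := dvd_trans (by norm_num) h
    rcases (hp5.dvd_mul).mp h5' with hh | hh <;> exact hh
  omega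

theorem main_neg (N : Int) (hN : N < 0) (hnd : ¬ (10:Int) ∣ N) : solve N = solve_alt N := by
  have h100 : ¬ (100:Int) ∣ N ^ 2 := by
    intro hd
    exact hnd (hundred_dvd_sq N (by rwa [← sq]))
  rw [solve_neg N hN, solve_alt_neg N hN, stripB, dif_neg, sq]
  rintro ⟨-, hm⟩
  exact h100 ((PySem.Int.mod_eq_zero_iff_dvd _ 100).mp hm)

theorem stripB_le (a : Int) (ha : 0 ≤ a) : stripB a ≤ a := by
  induction a using stripB.induct with
  | case1 a h ih =>
    obtain ⟨h0, hm⟩ := h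
    have hdvd : (100 : Int) ∣ a := (PySem.Int.mod_eq_zero_iff_dvd a 100).mp hm
    have hpos : 0 < a := by omega
    have h100le : 100 ≤ a := Int.le_of_dvd hpos hdvd
    rw [stripB, dif_pos ⟨h0, hm⟩]
    have hfd : PySem.Int.floordiv a 100 = a / 100 :=
      PySem.Int.floordiv_eq_ediv_of_pos (by omega)
    have hq0 : 0 ≤ a / 100 := Int.ediv_nonneg ha (by omega)
    have hqa : a / 100 ≤ a := Int.ediv_le_self 100 ha
    calc stripB (PySem.Int.floordiv a 100) ≤ PySem.Int.floordiv a 100 := ih (by omega)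
      _ ≤ a := by omega
  | case2 a h => rw [stripB, dif_neg h]

theorem stripB_lt (a : Int) (ha : 100 ≤ a) (hd : (100:Int) ∣ a) : stripB a < a := by
  have hm : PySem.Int.mod a 100 = 0 := (PySem.Int.mod_eq_zero_iff_dvd a 100).mpr hd
  rw [stripB, dif_pos ⟨by omega, hm⟩,
    PySem.Int.floordiv_eq_ediv_of_pos (by omega : (0:Int) < 100)]
  have had := Int.mul_ediv_add_emod a 100
  have hq1 : 1 ≤ a / 100 := by
    have := Int.ediv_le_ediv (by omega : (0:Int) < 100) ha
    simpa using this
  have hle := stripB_le (a / 100) (by omega)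
  omega

-- ===== VERDICT (by name: the statement is the Claim_ definition above) =====
theorem solve_spec : Claim_unchanged_solve := by
  intro N _
  unfold Spec_solve
  intro hnD
  by_cases hN : 0 ≤ N
  · exact main_eq N hN
  · have hN' : N < 0 := by omega
    refine main_neg N hN' (fun hd => ?_)
    exact hnD ⟨hN', hd⟩

theorem solve_changed : Claim_changed_solve := by
  unfold Claim_changed_solve
  refine ⟨by decide, by decide, ?_, ?_, by decide⟩
  · show solve (-10) = 1
    rw [solve_neg (-10) (by omega)]
    have : ((-10:Int)) ^ 2 = 100 := by norm_num
    rw [this, stripB, dif_pos (by decide), stripB, dif_neg (by decide)]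
    decide
  · show solve_alt (-10) = 100
    rw [solve_alt_neg (-10) (by omega)]
    norm_num

theorem solve_tight : Claim_exact_solve := by
  intro N _ hD
  obtain ⟨hN, hdvd⟩ := hD
  have hN10 : N ≤ -10 := by omega
  have h100 : (100:Int) ∣ N ^ 2 := by
    obtain ⟨c, rfl⟩ := hdvd
    exact ⟨c * c, by ring⟩
  have hge : (100:Int) ≤ N ^ 2 := by
    have e : N ^ 2 = (-N) * (-N) := by ring
    have h10 : (10:Int) ≤ -N := by omega
    have := mul_le_mul h10 h10 (by omega) (by omega)
    linarith
  rw [solve_neg N hN, solve_alt_neg N hN]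
  have := stripB_lt (N ^ 2) hge h100
  have hsq : N ^ 2 = N * N := sq N
  omega
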